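-- pv_equiv track=rewrite | github.com/eprifti/audio2decodeMorse | analyses/add_predictions.py | levenshtein_ops
-- ===== SOURCE A (Python) =====
-- def levenshtein_ops(ref: str, hyp: str):
--     n, m = len(ref), len(hyp)
--     dp = [[(0, None) for _ in range(m + 1)] for _ in range(n + 1)]
--     for i in range(1, n + 1):
--         dp[i][0] = (i, "del")
--     for j in range(1, m + 1):
--         dp[0][j] = (j, "ins")
--     for i in range(1, n + 1):
--         for j in range(1, m + 1):
--             cost_sub = dp[i - 1][j - 1][0] + (ref[i - 1] != hyp[j - 1])
--             cost_del = dp[i - 1][j][0] + 1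
--             cost_ins = dp[i][j - 1][0] + 1
--             best = min(cost_sub, cost_del, cost_ins)
--             if best == cost_sub:
--                 op = "match" if ref[i - 1] == hyp[j - 1] else "sub"
--             elif best == cost_del:
--                 op = "del"
--             else:
--                 op = "ins"
--             dp[i][j] = (best, op)
--     ops = []
--     i, j = n, m
--     while i > 0 or j > 0:
--         _, op = dp[i][j]
--         if op in ("match", "sub"):
--             ops.append((op, ref[i - 1], hyp[j - 1]))
--             i -= 1
--             j -= 1
--         elif op == "del":
--             ops.append((op, ref[i - 1], ""))
--             i -= 1
--         elif op == "ins":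
--             ops.append((op, "", hyp[j - 1]))
--             j -= 1
--     ops.reverse()
--     return ops
-- ===== SOURCE B (Python) =====
-- def levenshtein_ops(ref: str, hyp: str):
--     n, m = len(ref), len(hyp)
--     # One forward pass, two rolling rows; each cell carries (cost, chain) where
--     # chain is a persistent reversed linked list of ops: None or (op_triple, parent_chain).
--     # No op matrix is kept and there is no backtrace phase over a matrix.
--     prev = [(0, None)]
--     for j in range(1, m + 1):
--         prev.append((j, (("ins", "", hyp[j - 1]), prev[j - 1][1])))
--     for i in range(1, n + 1):
--         rc = ref[i - 1]
--         cur = [(i, (("del", rc, ""), prev[0][1]))]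
--         for j in range(1, m + 1):
--             hc = hyp[j - 1]
--             cost_sub = prev[j - 1][0] + (rc != hc)
--             cost_del = prev[j][0] + 1
--             cost_ins = cur[j - 1][0] + 1
--             best = min(cost_sub, cost_del, cost_ins)
--             if best == cost_sub:
--                 cell = (best, (("match" if rc == hc else "sub", rc, hc), prev[j - 1][1]))
--             elif best == cost_del:
--                 cell = (best, (("del", rc, ""), prev[j][1]))
--             else:
--                 cell = (best, (("ins", "", hc), cur[j - 1][1]))
--             cur.append(cell)
--         prev = cur
--     out = []
--     chain = prev[m][1]
--     while chain is not None:
--         out.append(chain[0])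
--         chain = chain[1]
--     out.reverse()
--     return out
-- ===== Notes on version B (the rewrite author's own statement) =====
-- stated objective: alternative
-- what changed: B replaces A's full (cost, op) matrix plus a separate backtrace phase by a single forward DP pass over two rolling rows in which every cell carries its whole alignment as a persistent linked chain shared between cells; the answer is read off the last cell, so no op is ever stored in a matrix and no traceback over a matrix happens.
import Mathlib
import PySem

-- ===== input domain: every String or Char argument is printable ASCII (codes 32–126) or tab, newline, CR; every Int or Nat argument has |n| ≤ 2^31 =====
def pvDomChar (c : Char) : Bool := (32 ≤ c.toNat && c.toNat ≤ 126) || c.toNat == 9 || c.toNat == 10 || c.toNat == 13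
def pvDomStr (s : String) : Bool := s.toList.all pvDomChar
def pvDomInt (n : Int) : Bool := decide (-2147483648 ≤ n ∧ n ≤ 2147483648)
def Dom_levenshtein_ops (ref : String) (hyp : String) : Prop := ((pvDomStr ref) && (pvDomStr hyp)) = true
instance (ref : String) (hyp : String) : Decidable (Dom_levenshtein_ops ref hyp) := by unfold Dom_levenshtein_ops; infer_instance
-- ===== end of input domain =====

-- B replaces A's (cost, op) matrix + backtrace by one forward DP pass over two rolling rows
-- whose cells carry their alignment as persistent linked chains; objective: alternative, no speed claim.

-- ===== PORT A =====
-- Python's `(ref[i-1] != hyp[j-1])` used as an int (both sources contain this very expression).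
def pvSub (a b : Char) : Int := if a = b then 0 else 1

-- inner loop `for j in range(1, m+1)` filling row i (1-based); Python mutates dp[i][j] in place,
-- here the row is grown left to right over jm1 = j-1 ∈ range m: same cells, same order.
-- All indices are provably in range and nonnegative, so List.getD is exact for Python's xs[k].
def pvRowA (r h : List Char) (prev : List (Int × Option String)) (i : Nat) :
    List (Int × Option String) :=
  (List.range h.length).foldl
    (fun row jm1 =>
      let rc := r.getD (i - 1) ' '
      let hc := h.getD jm1 ' '
      let cost_sub := (prev.getD jm1 (0, none)).1 + pvSub rc hc
      let cost_del := (prev.getD (jm1 + 1) (0, none)).1 + 1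
      let cost_ins := (row.getD jm1 (0, none)).1 + 1
      let best := min cost_sub (min cost_del cost_ins)
      let op := if best = cost_sub then (if rc = hc then "match" else "sub")
                else if best = cost_del then "del" else "ins"
      row ++ [(best, some op)])
    [((i : Int), some "del")]          -- dp[i][0] = (i, "del")

-- the `while i > 0 or j > 0` backtrace; fuel n+m bounds the loop (each step lowers i+j by ≥ 1);
-- the final `else []` is unreachable (every visited cell with i>0 or j>0 carries an op).
def pvBackA (dp : List (List (Int × Option String))) (r h : List Char) :
    Nat → Nat → Nat → List (String × String × String)
  | 0, _, _ => []
  | fuel + 1, i, j =>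
    if i = 0 ∧ j = 0 then []
    else
      let op := ((dp.getD i []).getD j (0, none)).2
      if op = some "match" ∨ op = some "sub" then
        (op.getD "", String.singleton (r.getD (i - 1) ' '),
          String.singleton (h.getD (j - 1) ' ')) :: pvBackA dp r h fuel (i - 1) (j - 1)
      else if op = some "del" then
        ("del", String.singleton (r.getD (i - 1) ' '), "") :: pvBackA dp r h fuel (i - 1) j
      else if op = some "ins" then
        ("ins", "", String.singleton (h.getD (j - 1) ' ')) :: pvBackA dp r h fuel i (j - 1)
      else []

def levenshtein_ops (ref : String) (hyp : String) : List (String × String × String) :=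
  let r := ref.toList
  let h := hyp.toList
  let n := r.length
  let m := h.length
  -- row 0: dp[0][0] = (0, None), dp[0][j] = (j, "ins")
  let row0 : List (Int × Option String) :=
    (0, none) :: (List.range m).map (fun (jm1 : Nat) => (((jm1 : Int) + 1), some "ins"))
  -- rows 1..n, each filled from the previous one (Python's loops compute the same cells in the same order)
  let dp := (List.range n).foldl
    (fun rows im1 => rows ++ [pvRowA r h (rows.getD im1 []) (im1 + 1)]) [row0]
  (pvBackA dp r h (n + m) n m).reverse    -- ops built head-first, then ops.reverse()

-- ===== PORT B =====
-- Source B's cells are (cost, chain); the Python chain (None / (triple, parent)) is the obvious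
-- persistent linked list, ported as List (String × String × String) ([] / triple :: parent).
-- Source B's inner loop `for j in range(1, m+1)` growing `cur` from [(i, ("del",...))].
def pvRowB (r h : List Char)
    (prev : List (Int × List (String × String × String))) (i : Nat) :
    List (Int × List (String × String × String)) :=
  let rc := r.getD (i - 1) ' '
  (List.range h.length).foldl
    (fun cur jm1 =>
      let hc := h.getD jm1 ' '
      let cost_sub := (prev.getD jm1 (0, [])).1 + pvSub rc hc
      let cost_del := (prev.getD (jm1 + 1) (0, [])).1 + 1
      let cost_ins := (cur.getD jm1 (0, [])).1 + 1
      let best := min cost_sub (min cost_del cost_ins)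
      let cell :=
        if best = cost_sub then
          (best, ((if rc = hc then "match" else "sub"), String.singleton rc, String.singleton hc)
                    :: (prev.getD jm1 (0, [])).2)
        else if best = cost_del then
          (best, ("del", String.singleton rc, "") :: (prev.getD (jm1 + 1) (0, [])).2)
        else
          (best, ("ins", "", String.singleton hc) :: (cur.getD jm1 (0, [])).2)
      cur ++ [cell])
    [((i : Int), ("del", String.singleton rc, "") :: (prev.getD 0 (0, [])).2)]

def levenshtein_ops_alt (ref : String) (hyp : String) : List (String × String × String) :=
  let r := ref.toList
  let h := hyp.toList
  let n := r.length
  let m := h.length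
  -- `prev = [(0, None)]` then the j-loop appending (j, ins-chain)
  let row0 : List (Int × List (String × String × String)) :=
    (List.range m).foldl
      (fun prev (jm1 : Nat) =>
        prev ++ [(((jm1 : Int) + 1),
          ("ins", "", String.singleton (h.getD jm1 ' ')) :: (prev.getD jm1 (0, [])).2)])
      [(0, [])]
  -- `for i in range(1, n+1): ... prev = cur`
  let last := (List.range n).foldl (fun prev im1 => pvRowB r h prev (im1 + 1)) row0
  -- the `while chain` walk emits the chain's triples in order (last op first), then out.reverse()
  ((last.getD m (0, [])).2).reverse

-- ===== PRECONDITION & SPEC =====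
def Spec_levenshtein_ops (ref : String) (hyp : String) (out : List (String × String × String)) : Prop := out = levenshtein_ops_alt ref hyp
instance (ref : String) (hyp : String) (out : List (String × String × String)) : Decidable (Spec_levenshtein_ops ref hyp out) := by unfold Spec_levenshtein_ops; infer_instance

-- ===== CLAIM (what is proved, stated in full; the proofs are below) =====
def Claim_equal_levenshtein_ops : Prop := ∀ (ref : String) (hyp : String), Dom_levenshtein_ops ref hyp → Spec_levenshtein_ops ref hyp (levenshtein_ops ref hyp)

-- ===== LEMMAS AND PROOFS =====

-- the Levenshtein cost dp[i][j] (common characterisation of both versions' costs)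
def pvC (r h : List Char) : Nat → Nat → Int
  | 0, j => (j : Int)
  | i + 1, 0 => (i : Int) + 1
  | i + 1, j + 1 =>
      min (pvC r h i j + pvSub (r.getD i ' ') (h.getD j ' '))
        (min (pvC r h i (j + 1) + 1) (pvC r h (i + 1) j + 1))

-- the op A stores in dp[i][j]
def pvOp (r h : List Char) : Nat → Nat → Option String
  | 0, 0 => none
  | _ + 1, 0 => some "del"
  | 0, _ + 1 => some "ins"
  | i + 1, j + 1 =>
      some (if pvC r h (i + 1) (j + 1) = pvC r h i j + pvSub (r.getD i ' ') (h.getD j ' ') then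
              (if r.getD i ' ' = h.getD j ' ' then "match" else "sub")
            else if pvC r h (i + 1) (j + 1) = pvC r h i (j + 1) + 1 then "del" else "ins")

-- the chain B's cell (i, j) carries (reversed alignment of ref[:i], hyp[:j])
def pvChain (r h : List Char) : Nat → Nat → List (String × String × String)
  | 0, 0 => []
  | 0, j + 1 => ("ins", "", String.singleton (h.getD j ' ')) :: pvChain r h 0 j
  | i + 1, 0 => ("del", String.singleton (r.getD i ' '), "") :: pvChain r h i 0
  | i + 1, j + 1 =>
      if pvC r h (i + 1) (j + 1) = pvC r h i j + pvSub (r.getD i ' ') (h.getD j ' ') then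
        ((if r.getD i ' ' = h.getD j ' ' then "match" else "sub"),
          String.singleton (r.getD i ' '), String.singleton (h.getD j ' ')) :: pvChain r h i j
      else if pvC r h (i + 1) (j + 1) = pvC r h i (j + 1) + 1 then
        ("del", String.singleton (r.getD i ' '), "") :: pvChain r h i (j + 1)
      else
        ("ins", "", String.singleton (h.getD j ' ')) :: pvChain r h (i + 1) j

theorem pvC_succ_succ (r h : List Char) (i j : Nat) :
    pvC r h (i + 1) (j + 1)
      = min (pvC r h i j + pvSub (r.getD i ' ') (h.getD j ' '))
          (min (pvC r h i (j + 1) + 1) (pvC r h (i + 1) j + 1)) := by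
  simp [pvC]

theorem pvOp_zero_succ (r h : List Char) (j : Nat) : pvOp r h 0 (j + 1) = some "ins" := rfl

theorem pvOp_succ_zero (r h : List Char) (i : Nat) : pvOp r h (i + 1) 0 = some "del" := rfl

theorem pvOp_succ_succ (r h : List Char) (i j : Nat) :
    pvOp r h (i + 1) (j + 1)
      = some (if pvC r h (i + 1) (j + 1) = pvC r h i j + pvSub (r.getD i ' ') (h.getD j ' ') then
                (if r.getD i ' ' = h.getD j ' ' then "match" else "sub")
              else if pvC r h (i + 1) (j + 1) = pvC r h i (j + 1) + 1 then "del" else "ins") := rfl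

theorem pvChain_zero_succ (r h : List Char) (j : Nat) :
    pvChain r h 0 (j + 1) = ("ins", "", String.singleton (h.getD j ' ')) :: pvChain r h 0 j := by
  simp [pvChain]

theorem pvChain_succ_zero (r h : List Char) (i : Nat) :
    pvChain r h (i + 1) 0 = ("del", String.singleton (r.getD i ' '), "") :: pvChain r h i 0 := by
  simp [pvChain]

theorem pvChain_succ_succ (r h : List Char) (i j : Nat) :
    pvChain r h (i + 1) (j + 1)
      = if pvC r h (i + 1) (j + 1) = pvC r h i j + pvSub (r.getD i ' ') (h.getD j ' ') then
          ((if r.getD i ' ' = h.getD j ' ' then "match" else "sub"),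
            String.singleton (r.getD i ' '), String.singleton (h.getD j ' ')) :: pvChain r h i j
        else if pvC r h (i + 1) (j + 1) = pvC r h i (j + 1) + 1 then
          ("del", String.singleton (r.getD i ' '), "") :: pvChain r h i (j + 1)
        else
          ("ins", "", String.singleton (h.getD j ' ')) :: pvChain r h (i + 1) j := by
  simp [pvChain]

theorem pvRowA_go (r h : List Char) (i : Nat) (k : Nat) (hk : k ≤ h.length) :
    (List.range k).foldl
      (fun row jm1 =>
        let rc := r.getD (i + 1 - 1) ' '
        let hc := h.getD jm1 ' '
        let cost_sub := (((List.range (h.length + 1)).map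
            (fun j => (pvC r h i j, pvOp r h i j))).getD jm1 (0, none)).1 + pvSub rc hc
        let cost_del := (((List.range (h.length + 1)).map
            (fun j => (pvC r h i j, pvOp r h i j))).getD (jm1 + 1) (0, none)).1 + 1
        let cost_ins := (row.getD jm1 (0, none)).1 + 1
        let best := min cost_sub (min cost_del cost_ins)
        let op := if best = cost_sub then (if rc = hc then "match" else "sub")
                  else if best = cost_del then "del" else "ins"
        row ++ [(best, some op)])
      [(((i + 1 : Nat) : Int), some "del")]
      = (List.range (k + 1)).map (fun j => (pvC r h (i + 1) j, pvOp r h (i + 1) j)) := by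
  induction k with
  | zero =>
    simp [pvC, pvOp]
  | succ k ih =>
    rw [show List.range (k + 1) = List.range k ++ [k] from List.range_succ,
        List.foldl_append, ih (by omega)]
    simp only [List.foldl_cons, List.foldl_nil]
    rw [PySem.List.getD_map_range _ _ _ _ (by omega),
        PySem.List.getD_map_range _ _ _ _ (by omega),
        PySem.List.getD_map_range _ _ _ _ (by omega)]
    rw [show List.range (k + 1 + 1) = List.range (k + 1) ++ [k + 1] from List.range_succ,
        List.map_append]
    simp [pvC, pvOp]

theorem pvRowA_spec (r h : List Char) (i : Nat) :
    pvRowA r h ((List.range (h.length + 1)).map (fun j => (pvC r h i j, pvOp r h i j))) (i + 1)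
      = (List.range (h.length + 1)).map (fun j => (pvC r h (i + 1) j, pvOp r h (i + 1) j)) := by
  unfold pvRowA
  exact pvRowA_go r h i h.length le_rfl

theorem pvDpA_spec (r h : List Char) :
    (List.range r.length).foldl
      (fun rows im1 => rows ++ [pvRowA r h (rows.getD im1 []) (im1 + 1)])
      [(0, none) :: (List.range h.length).map (fun (jm1 : Nat) => (((jm1 : Int) + 1), some "ins"))]
      = (List.range (r.length + 1)).map
          (fun i => (List.range (h.length + 1)).map (fun j => (pvC r h i j, pvOp r h i j))) := by
  have row0 : (0, none) :: (List.range h.length).map (fun (jm1 : Nat) => (((jm1 : Int) + 1), some "ins"))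
      = (List.range (h.length + 1)).map (fun j => (pvC r h 0 j, pvOp r h 0 j)) := by
    rw [List.range_succ_eq_map, List.map_cons, List.map_map]
    refine congrArg₂ _ (by simp [pvC, pvOp]) (List.map_congr_left ?_)
    intro a _
    simp only [Function.comp_apply]
    show ((a : Int) + 1, some "ins") = (pvC r h 0 (a + 1), pvOp r h 0 (a + 1))
    simp [pvC, pvOp]
  rw [row0]
  have go : ∀ k, k ≤ r.length →
      (List.range k).foldl
        (fun rows im1 => rows ++ [pvRowA r h (rows.getD im1 []) (im1 + 1)])
        [(List.range (h.length + 1)).map (fun j => (pvC r h 0 j, pvOp r h 0 j))]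
      = (List.range (k + 1)).map
          (fun i => (List.range (h.length + 1)).map (fun j => (pvC r h i j, pvOp r h i j))) := by
    intro k
    induction k with
    | zero => simp
    | succ k ih =>
      intro hk
      rw [show List.range (k + 1) = List.range k ++ [k] from List.range_succ,
          List.foldl_append, ih (by omega)]
      simp only [List.foldl_cons, List.foldl_nil]
      rw [PySem.List.getD_map_range _ _ _ _ (by omega), pvRowA_spec,
          show List.range (k + 1 + 1) = List.range (k + 1) ++ [k + 1] from List.range_succ,
          List.map_append]
      simp
  exact go r.length le_rfl

theorem pvEntryA (r h : List Char) (a b : Nat) (ha : a ≤ r.length) (hb : b ≤ h.length) :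
    (((List.range (r.length + 1)).map
        (fun i => (List.range (h.length + 1)).map (fun j => (pvC r h i j, pvOp r h i j)))).getD a []).getD b (0, none)
      = (pvC r h a b, pvOp r h a b) := by
  rw [PySem.List.getD_map_range _ _ _ _ (by omega), PySem.List.getD_map_range _ _ _ _ (by omega)]

-- A's backtrace from (i, j) over the characterised matrix emits exactly B's chain at (i, j)
theorem pvBackA_eq_chain (r h : List Char) (fuel : Nat) :
    ∀ i j, i ≤ r.length → j ≤ h.length → i + j ≤ fuel →
      pvBackA ((List.range (r.length + 1)).map
          (fun i => (List.range (h.length + 1)).map (fun j => (pvC r h i j, pvOp r h i j)))) r h fuel i j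
        = pvChain r h i j := by
  induction fuel with
  | zero =>
    intro i j _ _ hf
    have hi : i = 0 := by omega
    have hj : j = 0 := by omega
    subst hi; subst hj
    simp [pvBackA, pvChain]
  | succ fuel ih =>
    intro i j hi hj hf
    rcases i with _ | i' <;> rcases j with _ | j'
    · simp [pvBackA, pvChain]
    · simp only [pvBackA, pvEntryA r h 0 (j' + 1) (by omega) hj, pvOp_zero_succ,
        pvChain_zero_succ, Nat.add_sub_cancel]
      simp [ih 0 j' (by omega) (by omega) (by omega)]
    · simp only [pvBackA, pvEntryA r h (i' + 1) 0 hi (by omega), pvOp_succ_zero,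
        pvChain_succ_zero, Nat.add_sub_cancel]
      simp [ih i' 0 (by omega) (by omega) (by omega)]
    · simp only [pvBackA, Nat.add_sub_cancel,
        pvEntryA r h (i' + 1) (j' + 1) hi hj, pvOp_succ_succ, pvChain_succ_succ]
      by_cases h1 : pvC r h (i' + 1) (j' + 1)
          = pvC r h i' j' + pvSub (r.getD i' ' ') (h.getD j' ' ')
      · simp only [if_pos h1]
        by_cases h3 : r.getD i' ' ' = h.getD j' ' '
        · simp only [if_pos h3]
          simp [ih i' j' (by omega) (by omega) (by omega)]
        · simp only [if_neg h3]
          simp [ih i' j' (by omega) (by omega) (by omega)]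
      · simp only [if_neg h1]
        by_cases h2 : pvC r h (i' + 1) (j' + 1) = pvC r h i' (j' + 1) + 1
        · simp only [if_pos h2]
          simp [ih i' (j' + 1) (by omega) hj (by omega)]
        · simp only [if_neg h2]
          simp [ih (i' + 1) j' hi (by omega) (by omega)]

theorem pvRowB_go (r h : List Char) (i : Nat) (k : Nat) (hk : k ≤ h.length) :
    (List.range k).foldl
      (fun cur jm1 =>
        let hc := h.getD jm1 ' '
        let cost_sub := (((List.range (h.length + 1)).map
            (fun j => (pvC r h i j, pvChain r h i j))).getD jm1 (0, [])).1
            + pvSub (r.getD (i + 1 - 1) ' ') hc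
        let cost_del := (((List.range (h.length + 1)).map
            (fun j => (pvC r h i j, pvChain r h i j))).getD (jm1 + 1) (0, [])).1 + 1
        let cost_ins := (cur.getD jm1 (0, [])).1 + 1
        let best := min cost_sub (min cost_del cost_ins)
        let cell :=
          if best = cost_sub then
            (best, ((if r.getD (i + 1 - 1) ' ' = hc then "match" else "sub"),
                String.singleton (r.getD (i + 1 - 1) ' '), String.singleton hc)
                :: (((List.range (h.length + 1)).map
                    (fun j => (pvC r h i j, pvChain r h i j))).getD jm1 (0, [])).2)
          else if best = cost_del then
            (best, ("del", String.singleton (r.getD (i + 1 - 1) ' '), "")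
                :: (((List.range (h.length + 1)).map
                    (fun j => (pvC r h i j, pvChain r h i j))).getD (jm1 + 1) (0, [])).2)
          else
            (best, ("ins", "", String.singleton hc) :: (cur.getD jm1 (0, [])).2)
        cur ++ [cell])
      [(((i + 1 : Nat) : Int),
        ("del", String.singleton (r.getD (i + 1 - 1) ' '), "")
          :: (((List.range (h.length + 1)).map
              (fun j => (pvC r h i j, pvChain r h i j))).getD 0 (0, [])).2)]
      = (List.range (k + 1)).map (fun j => (pvC r h (i + 1) j, pvChain r h (i + 1) j)) := by
  induction k with
  | zero =>
    rw [PySem.List.getD_map_range _ _ _ _ (by omega)]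
    simp [pvC, pvChain]
  | succ k ih =>
    rw [show List.range (k + 1) = List.range k ++ [k] from List.range_succ,
        List.foldl_append, ih (by omega)]
    simp only [List.foldl_cons, List.foldl_nil]
    rw [PySem.List.getD_map_range _ _ _ _ (by omega),
        PySem.List.getD_map_range _ _ _ _ (by omega),
        PySem.List.getD_map_range _ _ _ _ (by omega)]
    rw [show List.range (k + 1 + 1) = List.range (k + 1) ++ [k + 1] from List.range_succ,
        List.map_append]
    simp only [Nat.add_sub_cancel]
    have hcost := pvC_succ_succ r h i k
    by_cases h1 : pvC r h (i + 1) (k + 1) = pvC r h i k + pvSub (r.getD i ' ') (h.getD k ' ')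
    · rw [← hcost, if_pos h1]
      simp [pvChain_succ_succ, h1]
    · by_cases h2 : pvC r h (i + 1) (k + 1) = pvC r h i (k + 1) + 1
      · rw [← hcost, if_neg h1, if_pos h2]
        simp [pvChain_succ_succ, h2]
        simp only [List.getD_eq_getElem?_getD] at h1 h2
        omega
      · rw [← hcost, if_neg h1, if_neg h2]
        simp [pvChain_succ_succ, h2]
        simp only [List.getD_eq_getElem?_getD] at h1
        omega

theorem pvRowB_spec (r h : List Char) (i : Nat) :
    pvRowB r h ((List.range (h.length + 1)).map (fun j => (pvC r h i j, pvChain r h i j))) (i + 1)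
      = (List.range (h.length + 1)).map (fun j => (pvC r h (i + 1) j, pvChain r h (i + 1) j)) := by
  unfold pvRowB
  exact pvRowB_go r h i h.length le_rfl

theorem pvDpB_spec (r h : List Char) :
    (List.range r.length).foldl (fun prev im1 => pvRowB r h prev (im1 + 1))
      ((List.range h.length).foldl
        (fun prev (jm1 : Nat) =>
          prev ++ [(((jm1 : Int) + 1),
            ("ins", "", String.singleton (h.getD jm1 ' ')) :: (prev.getD jm1 (0, [])).2)])
        [(0, [])])
      = (List.range (h.length + 1)).map (fun j => (pvC r h r.length j, pvChain r h r.length j)) := by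
  have row0 : ∀ k, k ≤ h.length →
      (List.range k).foldl
        (fun prev (jm1 : Nat) =>
          prev ++ [(((jm1 : Int) + 1),
            ("ins", "", String.singleton (h.getD jm1 ' ')) :: (prev.getD jm1 (0, [])).2)])
        [(0, [])]
      = (List.range (k + 1)).map (fun j => (pvC r h 0 j, pvChain r h 0 j)) := by
    intro k
    induction k with
    | zero => simp [pvC, pvChain]
    | succ k ih =>
      intro hk
      rw [show List.range (k + 1) = List.range k ++ [k] from List.range_succ,
          List.foldl_append, ih (by omega)]
      simp only [List.foldl_cons, List.foldl_nil]
      rw [PySem.List.getD_map_range _ _ _ _ (by omega),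
          show List.range (k + 1 + 1) = List.range (k + 1) ++ [k + 1] from List.range_succ,
          List.map_append]
      simp [pvC, pvChain]
  rw [row0 h.length le_rfl]
  have go : ∀ k, k ≤ r.length →
      (List.range k).foldl (fun prev im1 => pvRowB r h prev (im1 + 1))
        ((List.range (h.length + 1)).map (fun j => (pvC r h 0 j, pvChain r h 0 j)))
      = (List.range (h.length + 1)).map (fun j => (pvC r h k j, pvChain r h k j)) := by
    intro k
    induction k with
    | zero => simp
    | succ k ih =>
      intro hk
      rw [show List.range (k + 1) = List.range k ++ [k] from List.range_succ,
          List.foldl_append, ih (by omega)]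
      simp only [List.foldl_cons, List.foldl_nil]
      exact pvRowB_spec r h k
  exact go r.length le_rfl

-- ===== VERDICT (by name: the statement is the Claim_ definition above) =====
theorem levenshtein_ops_spec : Claim_equal_levenshtein_ops := by
  intro ref hyp _
  show levenshtein_ops ref hyp = levenshtein_ops_alt ref hyp
  simp only [levenshtein_ops, levenshtein_ops_alt]
  rw [pvDpA_spec, pvDpB_spec,
    pvBackA_eq_chain ref.toList hyp.toList _ _ _ le_rfl le_rfl le_rfl,
    PySem.List.getD_map_range _ _ _ _ (by omega)]
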